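-- pv_equiv track=rewrite | github.com/architect-xyz/architect-py | scripts/generate_functions_md.py | find_section_for_lineno
-- ===== SOURCE A (Python) =====
-- def find_section_for_lineno(lineno, sections):
--     """
--     Given a line number (1-indexed) and a list of sections (name, lineno),
--     return the name of the last section that occurs before the given line number.
--     If none found, return "No Section".
--     """
--     candidate = None
--     for name, sec_line in sections:
--         if sec_line < lineno:
--             candidate = name
--         else:
--             break
--     return candidate if candidate is not None else "No Section"
-- ===== SOURCE B (Python) =====
-- def find_section_for_lineno(lineno, sections):
--     """
--     Binary search (sections are sorted ascending by line number, as built by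
--     scanning a file top-to-bottom): find the number of sections starting
--     before `lineno` and return the name of the last of them, or "No Section".
--     """
--     lo, hi = 0, len(sections)
--     while lo < hi:
--         mid = (lo + hi) // 2
--         if sections[mid][1] < lineno:
--             lo = mid + 1
--         else:
--             hi = mid
--     return sections[lo - 1][0] if lo > 0 else "No Section"
-- ===== Notes on version B (the rewrite author's own statement) =====
-- stated objective: alternative
-- what changed: Replaces A's left-to-right scan with a break by a binary search for the number of sections starting before lineno, indexing the answer directly; Pre_ requires the sections before lineno to form a leading run (true of the sorted-by-line-number lists the caller builds by scanning a file top-to-bottom), the precondition of binary search, because on other lists A's break-early value is an artefact of where the first out-of-order entry sits and binary search does not reproduce it.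
-- outside the precondition, e.g. on find_section_for_lineno(2, [('a', 5), ('b', 1)]): A returns 'No Section', B returns 'b'
import Mathlib
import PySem

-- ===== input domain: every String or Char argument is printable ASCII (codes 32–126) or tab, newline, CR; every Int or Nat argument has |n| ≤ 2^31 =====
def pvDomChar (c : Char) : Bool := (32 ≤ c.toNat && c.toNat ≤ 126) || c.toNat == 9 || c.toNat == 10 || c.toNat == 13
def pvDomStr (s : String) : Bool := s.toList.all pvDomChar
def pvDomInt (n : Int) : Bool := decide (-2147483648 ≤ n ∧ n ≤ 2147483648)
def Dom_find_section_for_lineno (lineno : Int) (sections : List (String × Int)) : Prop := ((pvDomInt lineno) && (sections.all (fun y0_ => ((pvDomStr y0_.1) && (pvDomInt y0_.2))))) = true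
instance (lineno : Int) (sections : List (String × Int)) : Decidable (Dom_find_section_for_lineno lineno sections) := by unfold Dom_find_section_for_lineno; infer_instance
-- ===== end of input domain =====

-- B replaces A's prefix scan-with-break by a binary search over the section line numbers (valid on the leading-run inputs stated in Pre_).

-- ===== PORT A =====
-- A's for-loop with a candidate accumulator and break.
def pvGoA (lineno : Int) : List (String × Int) → Option String → Option String
  | [], c => c
  | (name, sec_line) :: rest, c =>
    if sec_line < lineno then pvGoA lineno rest (some name) else c

def find_section_for_lineno (lineno : Int) (sections : List (String × Int)) : String :=
  match pvGoA lineno sections none with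
  | some c => c
  | none => "No Section"

-- ===== PORT B =====
-- B's while-loop binary search; `sections[mid]` is always in range (lo < hi ≤ length),
-- so `getD` with a dummy default is exact here.
def pvBisect (lineno : Int) (sections : List (String × Int)) (lo hi : Nat) : Nat :=
  if h : lo < hi then
    let mid := (lo + hi) / 2
    if (sections.getD mid ("", 0)).2 < lineno then pvBisect lineno sections (mid + 1) hi
    else pvBisect lineno sections lo mid
  else lo
termination_by hi - lo
decreasing_by all_goals omega

def find_section_for_lineno_alt (lineno : Int) (sections : List (String × Int)) : String :=
  let lo := pvBisect lineno sections 0 sections.length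
  if lo > 0 then (sections.getD (lo - 1) ("", 0)).1 else "No Section"

-- ===== PRECONDITION & SPEC =====
-- Pre_ requires the sections starting before `lineno` to form a leading run (no section
-- at/after `lineno` precedes one before it) — the shape a caller gets by collecting
-- sections while scanning a file top-to-bottom (sorted ascending by line number), and the
-- precondition of binary search; on other lists A's break-early value is an artefact of
-- where the first out-of-order entry sits and B does not reproduce it.
def Pre_find_section_for_lineno (lineno : Int) (sections : List (String × Int)) : Prop :=
  List.Pairwise (fun a b => b.2 < lineno → a.2 < lineno) sections
instance (lineno : Int) (sections : List (String × Int)) : Decidable (Pre_find_section_for_lineno lineno sections) := by unfold Pre_find_section_for_lineno; infer_instance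

def pvWitness_find_section_for_lineno : Int × (List (String × Int)) := (3, [("intro", 1), ("body", 2), ("end", 5)])

def Spec_find_section_for_lineno (lineno : Int) (sections : List (String × Int)) (out : String) : Prop := out = find_section_for_lineno_alt lineno sections
instance (lineno : Int) (sections : List (String × Int)) (out : String) : Decidable (Spec_find_section_for_lineno lineno sections out) := by unfold Spec_find_section_for_lineno; infer_instance

-- ===== CLAIM (what is proved, stated in full; the proofs are below) =====
def Claim_equal_find_section_for_lineno : Prop := ∀ (lineno : Int) (sections : List (String × Int)), Dom_find_section_for_lineno lineno sections → Pre_find_section_for_lineno lineno sections → Spec_find_section_for_lineno lineno sections (find_section_for_lineno lineno sections)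

-- ===== LEMMAS AND PROOFS =====

-- A's loop returns the last element of the leading run of sections before `lineno`.
lemma pvGoA_eq (lineno : Int) (sections : List (String × Int)) (c : Option String) :
    pvGoA lineno sections c =
      match (sections.takeWhile (fun s => s.2 < lineno)).getLast? with
      | some p => some p.1
      | none => c := by
  induction sections generalizing c with
  | nil => simp [pvGoA]
  | cons hd tl ih =>
    obtain ⟨name, sec_line⟩ := hd
    by_cases h : sec_line < lineno
    · rw [pvGoA, if_pos h, ih]
      cases htl : (tl.takeWhile (fun s => decide (s.2 < lineno))).getLast? <;>
        simp [List.takeWhile, h, List.getLast?_cons, htl]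
    · simp [pvGoA, List.takeWhile, h]

-- Inside the leading run, takeWhile agrees with the list and the predicate holds.
lemma takeWhile_getD (p : String × Int → Bool) (l : List (String × Int)) :
    ∀ j, j < (l.takeWhile p).length →
      (l.takeWhile p).getD j ("", 0) = l.getD j ("", 0) ∧
      p (l.getD j ("", 0)) = true := by
  induction l with
  | nil => simp
  | cons a t ih =>
    intro j hj
    by_cases ha : p a = true
    · rw [List.takeWhile_cons, if_pos ha] at hj ⊢
      cases j with
      | zero => simpa using ha
      | succ j =>
        simp only [List.getD_cons_succ]
        exact ih j (by simpa using hj)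
    · rw [List.takeWhile_cons, if_neg ha] at hj
      simp at hj

-- Just past the leading run, the predicate fails.
lemma takeWhile_stop (p : String × Int → Bool) (l : List (String × Int)) :
    (l.takeWhile p).length < l.length →
    p (l.getD (l.takeWhile p).length ("", 0)) = false := by
  induction l with
  | nil => simp
  | cons a t ih =>
    intro h
    by_cases ha : p a = true
    · rw [List.takeWhile_cons, if_pos ha] at h ⊢
      simpa using ih (by simpa using h)
    · rw [List.takeWhile_cons, if_neg ha]
      simpa using ha

-- Under Pre_: if a later section starts before `lineno`, so does every earlier one.
lemma mono_getD (lineno : Int) (sections : List (String × Int))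
    (hs : List.Pairwise (fun a b => b.2 < lineno → a.2 < lineno) sections)
    {i j : Nat} (hij : i < j) (hj : j < sections.length) :
    (sections.getD j ("", 0)).2 < lineno → (sections.getD i ("", 0)).2 < lineno := by
  rw [List.getD_eq_getElem sections ("", 0) (lt_trans hij hj),
      List.getD_eq_getElem sections ("", 0) hj]
  exact (List.pairwise_iff_getElem.mp hs) i j (lt_trans hij hj) hj hij

-- Binary search finds exactly the length of the leading run.
lemma pvBisect_eq (lineno : Int) (sections : List (String × Int))
    (hs : List.Pairwise (fun a b => b.2 < lineno → a.2 < lineno) sections) :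
    ∀ lo hi, lo ≤ (sections.takeWhile (fun s => s.2 < lineno)).length →
      (sections.takeWhile (fun s => s.2 < lineno)).length ≤ hi →
      hi ≤ sections.length →
      pvBisect lineno sections lo hi = (sections.takeWhile (fun s => s.2 < lineno)).length := by
  intro lo hi
  set p : String × Int → Bool := fun s => decide (s.2 < lineno) with hp
  set k := (sections.takeWhile p).length with hk
  induction hfi : hi - lo using Nat.strong_induction_on generalizing lo hi with
  | _ n ih =>
    intro hlok hkhi hhin
    by_cases hlt : lo < hi
    · rw [pvBisect]
      rw [dif_pos hlt]
      have hmid1 : (lo + hi) / 2 < hi := by omega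
      have hmid2 : lo ≤ (lo + hi) / 2 := by omega
      by_cases hc : (sections.getD ((lo + hi) / 2) ("", 0)).2 < lineno
      · rw [if_pos hc]
        -- predicate true at mid ⇒ mid < k (using sortedness)
        have hmidk : (lo + hi) / 2 < k := by
          by_contra hnk
          have hnk' : k ≤ (lo + hi) / 2 := by omega
          have hstop := takeWhile_stop p sections (by omega)
          rw [← hk, hp] at hstop
          simp only [decide_eq_false_iff_not, not_lt] at hstop
          rcases Nat.lt_or_ge k ((lo + hi) / 2) with hlt' | hge
          · have := mono_getD lineno sections hs hlt' (by omega) hc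
            omega
          · have hke : k = (lo + hi) / 2 := by omega
            rw [hke] at hstop
            omega
        exact ih (hi - ((lo + hi) / 2 + 1)) (by omega) _ _ rfl hmidk hkhi hhin
      · rw [if_neg hc]
        -- predicate false at mid ⇒ k ≤ mid
        have hkmid : k ≤ (lo + hi) / 2 := by
          by_contra hnk
          have hnk' : (lo + hi) / 2 < k := by omega
          have hmem := (takeWhile_getD p sections ((lo + hi) / 2) (by rw [← hk]; omega)).2
          rw [hp] at hmem
          simp only [decide_eq_true_eq] at hmem
          omega
        exact ih ((lo + hi) / 2 - lo) (by omega) _ _ rfl hlok hkmid (by omega)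
    · rw [pvBisect, dif_neg hlt]
      omega

-- ===== VERDICT (by name: the statement is the Claim_ definition above) =====

theorem find_section_for_lineno_spec : Claim_equal_find_section_for_lineno := by
  intro lineno sections _ hpre
  unfold Spec_find_section_for_lineno find_section_for_lineno find_section_for_lineno_alt
  set p : String × Int → Bool := fun s => decide (s.2 < lineno) with hp
  set k := (sections.takeWhile p).length with hk
  have hkn : k ≤ sections.length := (List.takeWhile_prefix p).length_le
  have hb : pvBisect lineno sections 0 sections.length = k :=
    pvBisect_eq lineno sections hpre 0 sections.length (Nat.zero_le _) hkn le_rfl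
  rw [pvGoA_eq, hb]
  rcases Nat.eq_zero_or_pos k with h0 | hpos
  · -- empty run: getLast? = none, lo = 0
    have hnil : sections.takeWhile p = [] := List.length_eq_zero_iff.mp h0
    rw [hp] at hnil
    rw [hnil]
    simp [h0]
  · have hlast : (sections.takeWhile p).getLast? =
        some ((sections.takeWhile p).getD (k - 1) ("", 0)) := by
      rw [List.getLast?_eq_getElem?, List.getElem?_eq_getElem (by omega)]
      rw [List.getD_eq_getElem _ ("", 0) (by omega)]
    have hagree := (takeWhile_getD p sections (k - 1) (by omega)).1
    rw [hp] at hlast hagree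
    rw [hlast, hagree]
    simp only [gt_iff_lt, hpos, if_pos]
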